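-- pv_equiv track=rewrite | github.com/marcant-oss/shorewall-nft | packages/shorewall-nft/shorewall_nft/compiler/ir/_data.py | _strip_limit_log_prefix
-- ===== SOURCE A (Python) =====
-- _SHOREWALL_LOG_LEVELS: frozenset[str] = frozenset({
--     "emerg", "alert", "crit", "err", "error", "warn", "warning",
--     "notice", "info", "debug",
--     "0", "1", "2", "3", "4", "5", "6", "7",
-- })
--
-- def _strip_limit_log_prefix(name_field: str) -> str | None:
--     """Strip an optional ``<level>[:<tag>]:`` prefix from a LIMIT name.
--
--     Shorewall ACTION columns accept the standard ``:level[:tag]`` suffix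
--     on any action. In ``Limit:info:LOGIN,4,60`` the fragment ``info:LOGIN``
--     arrives here as a single comma-segmented token — the ``:`` must be
--     peeled off because nft meter identifiers reject ``:``.
--
--     Examples::
--
--         "info:LOGIN"        → "LOGIN"
--         "debug:mailclnt"    → "mailclnt"
--         "info:SSH:LOGIN"    → "LOGIN"   (level + tag + name)
--         "LOGIN"             → "LOGIN"   (unchanged, no colon)
--         ""                  → None
--
--     Returns ``None`` when nothing meter-nameable remains (e.g. the input
--     was empty or contained only log-level tokens).
--     """
--     if ":" not in name_field:
--         return name_field or None
--     tokens = name_field.split(":")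
--     while tokens and tokens[0].lower() in _SHOREWALL_LOG_LEVELS:
--         tokens.pop(0)
--     if not tokens:
--         return None
--     # Remaining head ``tag:name`` keeps only the trailing ``name`` —
--     # the tag belongs on the logging side, not on the nft meter.
--     return tokens[-1] or None
-- ===== SOURCE B (Python) =====
-- _SHOREWALL_LOG_LEVELS: frozenset[str] = frozenset({
--     "emerg", "alert", "crit", "err", "error", "warn", "warning",
--     "notice", "info", "debug",
--     "0", "1", "2", "3", "4", "5", "6", "7",
-- })
--
-- def _strip_limit_log_prefix(name_field: str) -> str | None:
--     if ":" not in name_field: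
--         return name_field or None
--     return _strip(name_field)
--
-- def _strip(s: str) -> str | None:
--     # Peel one leading log-level token at a time with partition; never build a
--     # token list.  As soon as the leading token is not a log level, the answer
--     # is whatever follows the last separator of the remainder (rpartition tail).
--     head, sep, rest = s.partition(":")
--     if head.lower() not in _SHOREWALL_LOG_LEVELS:
--         return s.rpartition(":")[2] or None
--     if not sep:
--         return None          # s is a single log-level token
--     return _strip(rest)
-- ===== Notes on version B (the rewrite author's own statement) =====
-- stated objective: alternative
-- what changed: Replaces A's full split into a token list plus a destructive pop-front loop by a recursive peel: partition strips one leading log-level token per step, and as soon as the head token is not a log level the answer is the rpartition tail (text after the last separator); no token list is ever built.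
import Mathlib
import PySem

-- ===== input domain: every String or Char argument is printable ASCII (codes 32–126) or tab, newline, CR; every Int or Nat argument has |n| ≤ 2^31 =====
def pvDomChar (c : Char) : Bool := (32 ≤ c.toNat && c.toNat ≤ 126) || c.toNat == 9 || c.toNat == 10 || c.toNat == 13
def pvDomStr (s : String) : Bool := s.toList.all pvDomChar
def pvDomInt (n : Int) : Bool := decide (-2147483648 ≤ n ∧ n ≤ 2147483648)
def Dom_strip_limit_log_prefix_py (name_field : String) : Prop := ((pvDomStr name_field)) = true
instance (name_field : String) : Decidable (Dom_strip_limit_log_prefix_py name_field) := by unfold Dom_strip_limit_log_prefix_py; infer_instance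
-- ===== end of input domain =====

-- B replaces A's split-into-token-list + destructive pop-front loop by a recursive
-- peel with partition/rpartition that never builds a token list (objective: alternative).

-- ===== PORT A =====
def pvLogLevels : List String :=
  ["emerg", "alert", "crit", "err", "error", "warn", "warning",
   "notice", "info", "debug", "0", "1", "2", "3", "4", "5", "6", "7"]

-- the 'while tokens and tokens[0].lower() in _SHOREWALL_LOG_LEVELS: tokens.pop(0)' loop
def pvStripLoop : List String → List String
  | [] => []
  | t :: rest =>
      if pvLogLevels.contains (PySem.Str.lower t) then pvStripLoop rest else t :: rest

def strip_limit_log_prefix_py (name_field : String) : Option String :=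
  if PySem.Str.isIn ":" name_field = false then
    (if name_field = "" then none else some name_field)
  else
    match PySem.Str.split? name_field ":" with   -- ":" ≠ "" so the split succeeds
    | none => none
    | some tokens0 =>
      let tokens := pvStripLoop tokens0
      if tokens = [] then none
      else
        match PySem.List.pyGet? tokens (-1) with   -- tokens[-1] (tokens ≠ [] here)
        | none => none
        | some t => if t = "" then none else some t

-- ===== PORT B =====
-- _SHOREWALL_LOG_LEVELS on code points (same module constant, list-of-chars view)
def pvLogLevelsC : List (List Char) := pvLogLevels.map String.toList

-- hand port of s.partition(":"): (before first ':', ':' found?, after first ':');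
-- exact for the single-character separator ':'
def pvPartition : List Char → List Char × Bool × List Char
  | [] => ([], false, [])
  | c :: rest =>
      if c = ':' then ([], true, rest)
      else
        match pvPartition rest with
        | (h, f, r) => (c :: h, f, r)

-- the recursive call of _strip is on the part after the first ':', which is shorter
theorem pvPartition_found_length (cs h r : List Char)
    (hp : pvPartition cs = (h, true, r)) : r.length < cs.length := by
  induction cs generalizing h r with
  | nil => simp [pvPartition] at hp
  | cons c rest ih =>
      by_cases hc : c = ':'
      · simp [pvPartition, hc] at hp
        rw [hp.2]; simp
      · simp only [pvPartition, if_neg hc] at hp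
        rcases hq : pvPartition rest with ⟨h', f', r'⟩
        rw [hq] at hp
        simp at hp
        obtain ⟨_, hf, hr⟩ := hp
        subst hr
        exact Nat.lt_trans (ih h' r' (by rw [hq, hf])) (by simp)

-- hand port of s.rpartition(":")[2] (text after the LAST ':'; the whole string when
-- there is no ':'): one left-to-right pass that resets at each ':'; exact for ':'
def pvAfterLast (cs : List Char) : List Char :=
  cs.foldl (fun acc c => if c = ':' then [] else acc ++ [c]) []

-- port of the recursive helper _strip (on code points)
def pvStripRec (cs : List Char) : Option (List Char) :=
  match hp : pvPartition cs with
  | (head, found, rest) =>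
      if pvLogLevelsC.contains (PySem.Chars.lower head) = false then
        (if pvAfterLast cs = [] then none else some (pvAfterLast cs))
      else if hf : found = false then none
      else pvStripRec rest
termination_by cs.length
decreasing_by
  have hft : found = true := by revert hf; cases found <;> simp
  exact pvPartition_found_length cs head rest (hft ▸ hp)

def strip_limit_log_prefix_py_alt (name_field : String) : Option String :=
  if PySem.Str.isIn ":" name_field = false then
    (if name_field = "" then none else some name_field)
  else
    Option.map String.ofList (pvStripRec name_field.toList)

-- ===== PRECONDITION & SPEC =====
def Spec_strip_limit_log_prefix_py (name_field : String) (out : Option String) : Prop := out = strip_limit_log_prefix_py_alt name_field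
instance (name_field : String) (out : Option String) : Decidable (Spec_strip_limit_log_prefix_py name_field out) := by unfold Spec_strip_limit_log_prefix_py; infer_instance

-- ===== CLAIM (what is proved, stated in full; the proofs are below) =====
def Claim_equal_strip_limit_log_prefix_py : Prop := ∀ (name_field : String), Dom_strip_limit_log_prefix_py name_field → Spec_strip_limit_log_prefix_py name_field (strip_limit_log_prefix_py name_field)

-- ===== LEMMAS AND PROOFS =====


-- the first split-off piece, prepended with a prefix
def pvConsFirst (p : List Char) : List (List Char) → List (List Char)
  | [] => [p]
  | x :: xs => (p ++ x) :: xs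

theorem pvConsFirst_ne_nil (p : List Char) (ll : List (List Char)) :
    pvConsFirst p ll ≠ [] := by cases ll <;> simp [pvConsFirst]

theorem pvConsFirst_consFirst (p q : List Char) (ll : List (List Char)) :
    pvConsFirst p (pvConsFirst q ll) = pvConsFirst (p ++ q) ll := by
  cases ll <;> simp [pvConsFirst]

-- master lemma for PySem's split worker at separator ":"
theorem pvSplitGo (l : List Char) : ∀ (fuel : Nat) (cur : List Char) (acc : List (List Char)),
    l.length ≤ fuel →
    PySem.Chars.splitOn.go [':'] fuel l cur acc
      = acc.reverse ++ pvConsFirst cur.reverse (PySem.Chars.splitOn l [':']) := by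
  induction l with
  | nil =>
      intro fuel cur acc _
      cases fuel <;> simp [PySem.Chars.splitOn.go, PySem.Chars.splitOn, pvConsFirst]
  | cons c rest ih =>
      intro fuel cur acc hf
      match fuel, hf with
      | Nat.succ n, hf =>
        have hn : rest.length ≤ n := by simpa using hf
        by_cases hc : c = ':'
        · have hpre : [':'].isPrefixOf (c :: rest) = true := by simp [List.isPrefixOf, hc]
          rw [show PySem.Chars.splitOn.go [':'] (n+1) (c :: rest) cur acc
                = PySem.Chars.splitOn.go [':'] n (List.drop 1 (c :: rest)) [] (cur.reverse :: acc) by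
                simp [PySem.Chars.splitOn.go, hpre]]
          rw [show PySem.Chars.splitOn (c :: rest) [':']
                = PySem.Chars.splitOn.go [':'] ((c :: rest).length + 1) (c :: rest) [] [] from rfl]
          rw [show PySem.Chars.splitOn.go [':'] ((c :: rest).length + 1) (c :: rest) [] []
                = PySem.Chars.splitOn.go [':'] ((c :: rest).length) (List.drop 1 (c :: rest)) [] ([].reverse :: []) by
                simp [PySem.Chars.splitOn.go, hpre]]
          simp only [List.drop_one, List.tail_cons, List.reverse_nil]
          rw [ih n [] (cur.reverse :: acc) hn, ih ((c :: rest).length) [] [[]] (by simp)]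
          cases hrest : PySem.Chars.splitOn rest [':'] <;> simp [pvConsFirst]
        · have hpre : [':'].isPrefixOf (c :: rest) = false := by simp [List.isPrefixOf]; exact fun h => hc h.symm
          rw [show PySem.Chars.splitOn.go [':'] (n+1) (c :: rest) cur acc
                = PySem.Chars.splitOn.go [':'] n rest (c :: cur) acc by
                simp [PySem.Chars.splitOn.go, hpre]]
          rw [show PySem.Chars.splitOn (c :: rest) [':']
                = PySem.Chars.splitOn.go [':'] ((c :: rest).length + 1) (c :: rest) [] [] from rfl]
          rw [show PySem.Chars.splitOn.go [':'] ((c :: rest).length + 1) (c :: rest) [] []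
                = PySem.Chars.splitOn.go [':'] ((c :: rest).length) rest ([c]) [] by
                simp [PySem.Chars.splitOn.go, hpre]]
          rw [ih n (c :: cur) acc hn, ih ((c :: rest).length) [c] [] (by simp)]
          simp [pvConsFirst_consFirst]

theorem pvSplitOn_nil : PySem.Chars.splitOn [] [':'] = [[]] := rfl

theorem pvSplitOn_ne_nil (l : List Char) : PySem.Chars.splitOn l [':'] ≠ [] := by
  cases l with
  | nil => simp [pvSplitOn_nil]
  | cons c rest =>
      rw [show PySem.Chars.splitOn (c :: rest) [':']
            = PySem.Chars.splitOn.go [':'] ((c :: rest).length + 1) (c :: rest) [] [] from rfl]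
      by_cases hc : c = ':'
      · have hpre : [':'].isPrefixOf (c :: rest) = true := by simp [List.isPrefixOf, hc]
        rw [show PySem.Chars.splitOn.go [':'] ((c :: rest).length + 1) (c :: rest) [] []
              = PySem.Chars.splitOn.go [':'] ((c :: rest).length) (List.drop 1 (c :: rest)) [] [[]] by
              simp [PySem.Chars.splitOn.go, hpre]]
        rw [pvSplitGo _ _ _ _ (by simp)]
        simp
      · have hpre : [':'].isPrefixOf (c :: rest) = false := by simp [List.isPrefixOf]; exact fun h => hc h.symm
        rw [show PySem.Chars.splitOn.go [':'] ((c :: rest).length + 1) (c :: rest) [] []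
              = PySem.Chars.splitOn.go [':'] ((c :: rest).length) rest ([c]) [] by
              simp [PySem.Chars.splitOn.go, hpre]]
        rw [pvSplitGo _ _ _ _ (by simp)]
        simp [pvConsFirst_ne_nil]

-- split of a colon-free string is the singleton
theorem pvSplitOn_no_colon (l : List Char) (h : ':' ∉ l) :
    PySem.Chars.splitOn l [':'] = [l] := by
  induction l with
  | nil => exact pvSplitOn_nil
  | cons c rest ih =>
      have hc : c ≠ ':' := by intro hc; exact h (by simp [hc])
      have hpre : [':'].isPrefixOf (c :: rest) = false := by simp [List.isPrefixOf]; exact fun hh => hc hh.symm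
      rw [show PySem.Chars.splitOn (c :: rest) [':']
            = PySem.Chars.splitOn.go [':'] ((c :: rest).length + 1) (c :: rest) [] [] from rfl]
      rw [show PySem.Chars.splitOn.go [':'] ((c :: rest).length + 1) (c :: rest) [] []
            = PySem.Chars.splitOn.go [':'] ((c :: rest).length) rest ([c]) [] by
            simp [PySem.Chars.splitOn.go, hpre]]
      rw [pvSplitGo _ _ _ _ (by simp)]
      rw [ih (fun hm => h (List.mem_cons_of_mem _ hm))]
      simp [pvConsFirst]

-- split of "<head>:<rest>" with a colon-free head
theorem pvSplitOn_decomp (h r : List Char) (hh : ':' ∉ h) :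
    PySem.Chars.splitOn (h ++ ':' :: r) [':'] = h :: PySem.Chars.splitOn r [':'] := by
  induction h with
  | nil =>
      have hpre : [':'].isPrefixOf (':' :: r) = true := by simp [List.isPrefixOf]
      rw [show PySem.Chars.splitOn ([] ++ ':' :: r) [':']
            = PySem.Chars.splitOn.go [':'] ((':' :: r).length + 1) (':' :: r) [] [] from rfl]
      rw [show PySem.Chars.splitOn.go [':'] ((':' :: r).length + 1) (':' :: r) [] []
            = PySem.Chars.splitOn.go [':'] ((':' :: r).length) (List.drop 1 (':' :: r)) [] [[]] by
            simp [PySem.Chars.splitOn.go, hpre]]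
      rw [pvSplitGo _ _ _ _ (by simp)]
      cases hr : PySem.Chars.splitOn r [':'] with
      | nil => exact absurd hr (pvSplitOn_ne_nil r)
      | cons x xs => simp [pvConsFirst, hr]
  | cons c h' ih =>
      have hc : c ≠ ':' := by intro hc; exact hh (by simp [hc])
      have hpre : [':'].isPrefixOf (c :: (h' ++ ':' :: r)) = false := by
        simp [List.isPrefixOf]; exact fun hh2 => hc hh2.symm
      rw [show PySem.Chars.splitOn ((c :: h') ++ ':' :: r) [':']
            = PySem.Chars.splitOn.go [':'] (((c :: h') ++ ':' :: r).length + 1) (c :: (h' ++ ':' :: r)) [] [] from rfl]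
      rw [show PySem.Chars.splitOn.go [':'] (((c :: h') ++ ':' :: r).length + 1) (c :: (h' ++ ':' :: r)) [] []
            = PySem.Chars.splitOn.go [':'] (((c :: h') ++ ':' :: r).length) (h' ++ ':' :: r) ([c]) [] by
            simp [PySem.Chars.splitOn.go, hpre]]
      rw [pvSplitGo _ _ _ _ (by simp)]
      rw [ih (fun hm => hh (List.mem_cons_of_mem _ hm))]
      simp [pvConsFirst]

-- the two shapes pvPartition can produce
theorem pvPartition_false (cs h r : List Char) (hp : pvPartition cs = (h, false, r)) :
    h = cs ∧ ':' ∉ cs := by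
  induction cs generalizing h r with
  | nil => simp [pvPartition] at hp; simp [hp.1]
  | cons c rest ih =>
      by_cases hc : c = ':'
      · simp [pvPartition, hc] at hp
      · simp only [pvPartition, if_neg hc] at hp
        rcases hq : pvPartition rest with ⟨h', f', r'⟩
        rw [hq] at hp
        simp at hp
        obtain ⟨hh, hf, hr⟩ := hp
        obtain ⟨h1, h2⟩ := ih h' r' (by rw [hq, hf])
        constructor
        · rw [← hh, h1]
        · intro hm
          rcases List.mem_cons.mp hm with hm | hm
          · exact hc hm.symm
          · exact h2 hm

theorem pvPartition_true (cs h r : List Char) (hp : pvPartition cs = (h, true, r)) :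
    cs = h ++ ':' :: r ∧ ':' ∉ h := by
  induction cs generalizing h r with
  | nil => simp [pvPartition] at hp
  | cons c rest ih =>
      by_cases hc : c = ':'
      · simp [pvPartition, hc] at hp
        simp [hc, hp.1, hp.2]
      · simp only [pvPartition, if_neg hc] at hp
        rcases hq : pvPartition rest with ⟨h', f', r'⟩
        rw [hq] at hp
        simp at hp
        obtain ⟨hh, hf, hr⟩ := hp
        obtain ⟨h1, h2⟩ := ih h' r' (by rw [hq, hf])
        subst hr
        constructor
        · rw [← hh]; simp [h1]
        · rw [← hh]
          intro hm
          rcases List.mem_cons.mp hm with hm | hm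
          · exact hc hm.symm
          · exact h2 hm

-- pvAfterLast facts
theorem pvAfterLast_no_colon (cs : List Char) (h : ':' ∉ cs) : pvAfterLast cs = cs := by
  have key : ∀ (l : List Char) (acc : List Char), ':' ∉ l →
      l.foldl (fun acc c => if c = ':' then [] else acc ++ [c]) acc = acc ++ l := by
    intro l
    induction l with
    | nil => intro acc _; simp
    | cons c rest ih =>
        intro acc hl
        have hc : c ≠ ':' := fun hc => hl (by simp [hc])
        simp only [List.foldl_cons, if_neg hc]
        rw [ih _ (fun hm => hl (List.mem_cons_of_mem _ hm))]
        simp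
  simpa using key cs [] h

theorem pvAfterLast_append (h r : List Char) : pvAfterLast (h ++ ':' :: r) = pvAfterLast r := by
  unfold pvAfterLast
  rw [List.foldl_append]
  simp

theorem pvGetLast?_cons {A : Type} (x : A) (xs : List A) (h : xs ≠ []) :
    (x :: xs).getLast? = xs.getLast? := by
  cases xs with
  | nil => exact absurd rfl h
  | cons y ys => simp [List.getLast?]

-- last token of the split = text after the last colon
theorem pvSplitOn_getLast (cs : List Char) :
    (PySem.Chars.splitOn cs [':']).getLast? = some (pvAfterLast cs) := by
  induction hn : cs.length using Nat.strong_induction_on generalizing cs with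
  | _ n ih =>
    rcases hp : pvPartition cs with ⟨h, f, r⟩
    cases f with
    | false =>
        obtain ⟨_, hnc⟩ := pvPartition_false cs h r hp
        rw [pvSplitOn_no_colon cs hnc, pvAfterLast_no_colon cs hnc]
        simp
    | true =>
        obtain ⟨hcs, hnh⟩ := pvPartition_true cs h r hp
        subst hcs
        rw [pvSplitOn_decomp h r hnh, pvAfterLast_append]
        rw [pvGetLast?_cons _ _ (pvSplitOn_ne_nil r)]
        exact ih r.length (by subst hn; simp; omega) r rfl

-- a token is a log level: code-point form versus String form
theorem pvIsLevel_bridge (t : List Char) :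
    pvLogLevels.contains (PySem.Str.lower (String.ofList t))
      = pvLogLevelsC.contains (PySem.Chars.lower t) := by
  have h1 : PySem.Str.lower (String.ofList t) = String.ofList (PySem.Chars.lower t) := by
    simp [PySem.Str.lower]
  rw [h1]
  simp only [pvLogLevelsC, List.contains_eq_mem, decide_eq_decide]
  constructor
  · intro hm
    exact List.mem_map.mpr ⟨String.ofList (PySem.Chars.lower t), hm, by simp⟩
  · intro hm
    rcases List.mem_map.mp hm with ⟨s, hs, hts⟩
    have : String.ofList (PySem.Chars.lower t) = s := by
      rw [← hts]; simp
    rwa [this]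

-- characterization of B's recursive helper against the full split
theorem pvStripRec_eq (cs : List Char) :
    pvStripRec cs
      = (if (PySem.Chars.splitOn cs [':']).all (fun t => pvLogLevelsC.contains (PySem.Chars.lower t)) then none
         else if pvAfterLast cs = [] then none else some (pvAfterLast cs)) := by
  induction hn : cs.length using Nat.strong_induction_on generalizing cs with
  | _ n ih =>
    rw [pvStripRec]
    split
    rename_i head found rest heq
    cases found with
    | false =>
        obtain ⟨hhc, hnc⟩ := pvPartition_false cs head rest heq
        subst hhc
        rw [pvSplitOn_no_colon head hnc]
        by_cases hm : PySem.Chars.lower head ∈ pvLogLevelsC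
        · simp [List.contains_eq_mem, hm]
        · simp [List.contains_eq_mem, hm]
    | true =>
        obtain ⟨hcs, hnh⟩ := pvPartition_true cs head rest heq
        subst hcs
        rw [pvSplitOn_decomp head rest hnh, pvAfterLast_append]
        by_cases hm : PySem.Chars.lower head ∈ pvLogLevelsC
        · rw [ih rest.length (by subst hn; simp; omega) rest rfl]
          simp [List.contains_eq_mem, hm]
        · simp [List.contains_eq_mem, hm]



-- ===== A-side lemmas (the pop-front loop) =====

-- the pop-loop empties the list exactly when every token is a log level
theorem pvStripLoop_eq_nil_iff (ts : List String) :
    pvStripLoop ts = [] ↔ ts.all (fun t => pvLogLevels.contains (PySem.Str.lower t)) = true := by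
  induction ts with
  | nil => simp [pvStripLoop]
  | cons t rest ih =>
      by_cases h : PySem.Str.lower t ∈ pvLogLevels
      · simp [pvStripLoop, h, ih]
      · simp [pvStripLoop, h]

-- when the loop leaves something, the last element is unchanged
theorem pvStripLoop_getLast? (ts : List String) (h : pvStripLoop ts ≠ []) :
    (pvStripLoop ts).getLast? = ts.getLast? := by
  induction ts with
  | nil => simp [pvStripLoop] at h
  | cons t rest ih =>
      by_cases hh : PySem.Str.lower t ∈ pvLogLevels
      · have he : pvStripLoop (t :: rest) = pvStripLoop rest := by simp [pvStripLoop, hh]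
        have hr : pvStripLoop rest ≠ [] := by rw [he] at h; exact h
        have hrn : rest ≠ [] := by
          intro hn; subst hn; simp [pvStripLoop] at hr
        rw [he, ih hr, pvGetLast?_cons _ _ hrn]
      · simp [pvStripLoop, hh]

-- pyGet? at -1 on a nonempty list is getLast?
theorem pvPyGet_neg_one {A : Type} (xs : List A) (h : xs ≠ []) :
    PySem.List.pyGet? xs (-1) = xs.getLast? := by
  have hl : 0 < xs.length := List.length_pos_iff.mpr h
  have h1 : 1 ≤ xs.length := hl
  simp [PySem.List.pyGet?, PySem.List.pyIdx?, hl, h1, List.getLast?_eq_getElem?]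

-- ===== VERDICT (by name: the statement is the Claim_ definition above) =====
theorem strip_limit_log_prefix_py_spec : Claim_equal_strip_limit_log_prefix_py := by
  intro s _
  unfold Spec_strip_limit_log_prefix_py strip_limit_log_prefix_py strip_limit_log_prefix_py_alt
  by_cases hc : PySem.Str.isIn ":" s = false
  · rw [if_pos hc, if_pos hc]
  · rw [if_neg hc, if_neg hc]
    have hsp : PySem.Str.split? s ":" = some ((PySem.Chars.splitOn s.toList [':']).map String.ofList) := by
      simp [PySem.Str.split?, PySem.Chars.split?]
    rw [hsp, pvStripRec_eq]
    set T : List (List Char) := PySem.Chars.splitOn s.toList [':'] with hT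
    have hall : (T.map String.ofList).all (fun t => pvLogLevels.contains (PySem.Str.lower t))
        = T.all (fun t => pvLogLevelsC.contains (PySem.Chars.lower t)) := by
      rw [List.all_map]
      congr 1
      funext t
      exact pvIsLevel_bridge t
    simp only
    by_cases ha : T.all (fun t => pvLogLevelsC.contains (PySem.Chars.lower t)) = true
    · rw [if_pos ((pvStripLoop_eq_nil_iff _).mpr (by rw [hall]; exact ha)), if_pos ha]
      rfl
    · have hne : pvStripLoop (T.map String.ofList) ≠ [] := by
        intro he
        exact ha (by rw [← hall]; exact (pvStripLoop_eq_nil_iff _).mp he)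
      rw [if_neg hne, if_neg ha]
      rw [pvPyGet_neg_one _ hne, pvStripLoop_getLast? _ hne, List.getLast?_map,
          pvSplitOn_getLast s.toList]
      simp only [Option.map_some]
      by_cases hz : pvAfterLast s.toList = []
      · simp [hz]
      · have hz' : String.ofList (pvAfterLast s.toList) ≠ "" := fun hq => hz (by
          simpa using congrArg String.toList hq)
        simp [hz, hz']
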